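-- pv_equiv track=rewrite | github.com/su-ram/Problem-Solving | 백준/자료구조/좋은 단어.py | check
-- ===== SOURCE A (Python) =====
-- def check(string):
--     stack = []
--     for i in range(len(string)):
--         if stack and stack[-1] :
--             if string[i] == stack[-1]:
--                 stack.pop()
--             else:
--                 stack.append(string[i])
--         elif stack == [] :
--             stack.append(string[i])
--
--     return 1 if stack == [] else 0
-- ===== SOURCE B (Python) =====
-- def check(string):
--     chars = list(string)
--     while True:
--         found = False
--         i = 0
--         while i + 1 < len(chars):
--             if chars[i] == chars[i + 1]:
--                 del chars[i + 1]
--                 del chars[i]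
--                 found = True
--                 break
--             i += 1
--         if not found:
--             break
--     return 1 if not chars else 0
-- ===== Notes on version B (the rewrite author's own statement) =====
-- stated objective: alternative
-- what changed: Replaced the single stack pass with repeated scan-and-delete of the first adjacent equal pair until no pair remains, relying on confluence of adjacent-pair cancellation.
import Mathlib
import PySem

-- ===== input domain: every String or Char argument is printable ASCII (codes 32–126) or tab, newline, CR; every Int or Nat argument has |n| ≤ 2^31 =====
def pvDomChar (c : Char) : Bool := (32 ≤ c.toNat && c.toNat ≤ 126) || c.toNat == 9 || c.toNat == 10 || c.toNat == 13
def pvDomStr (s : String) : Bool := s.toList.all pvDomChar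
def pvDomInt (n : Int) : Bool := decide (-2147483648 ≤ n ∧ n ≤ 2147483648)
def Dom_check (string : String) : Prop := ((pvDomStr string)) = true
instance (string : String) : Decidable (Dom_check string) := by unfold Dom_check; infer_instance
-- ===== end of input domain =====

-- B replaces A's single stack pass by repeatedly deleting the first adjacent equal
-- pair until none remains (alternative algorithm, not faster); same return value.

-- ===== PORT A =====
-- One step of A's loop body: 'if stack and stack[-1]: …' — stack[-1] is a 1-char
-- string in Python, always truthy, so that test is just 'stack ≠ []'.
def checkStep (stack : List Char) (c : Char) : List Char :=
  if stack ≠ [] then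
    if c = stack.getLast! then stack.dropLast
    else stack ++ [c]
  else if stack = [] then stack ++ [c]
  else stack

-- 'for i in range(len(string)): … string[i]' visits the characters in order.
def check (string : String) : Int :=
  let stack := string.toList.foldl checkStep []
  if stack = [] then 1 else 0

-- ===== PORT B =====
-- Inner 'while i+1 < len(chars)' scan: find the first adjacent equal pair and
-- delete both, returning the shortened list, or none if no pair exists.
def findDel : List Char → Option (List Char)
  | a :: b :: rest => if a = b then some rest else (findDel (b :: rest)).map (a :: ·)
  | _ => none

theorem findDel_length {l l' : List Char} (h : findDel l = some l') :
    l'.length < l.length := by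
  induction l generalizing l' with
  | nil => simp [findDel] at h
  | cons a t ih =>
    cases t with
    | nil => simp [findDel] at h
    | cons b rest =>
      rw [findDel] at h
      split at h
      · cases h; simp
      · simp only [Option.map_eq_some_iff] at h
        obtain ⟨m, hm, rfl⟩ := h
        simpa using Nat.succ_lt_succ (ih hm)

-- Outer 'while True' loop: repeat until a full scan finds no pair.
def reduceLoop (l : List Char) : List Char :=
  match h : findDel l with
  | some l' => reduceLoop l'
  | none => l
termination_by l.length
decreasing_by exact findDel_length h

def check_alt (string : String) : Int :=
  if reduceLoop string.toList = [] then 1 else 0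

-- ===== PRECONDITION & SPEC =====
def Spec_check (string : String) (out : Int) : Prop := out = check_alt string
instance (string : String) (out : Int) : Decidable (Spec_check string out) := by unfold Spec_check; infer_instance

-- ===== CLAIM (what is proved, stated in full; the proofs are below) =====
def Claim_equal_check : Prop := ∀ (string : String), Dom_check string → Spec_check string (check string)

-- ===== LEMMAS AND PROOFS =====

-- Mirror of A's step with the stack top at the head of the list.
def rStep (stack : List Char) (c : Char) : List Char :=
  match stack with
  | [] => [c]
  | d :: t => if c = d then t else c :: d :: t

theorem checkStep_reverse (rs : List Char) (c : Char) :
    checkStep rs.reverse c = (rStep rs c).reverse := by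
  cases rs with
  | nil => simp [checkStep, rStep]
  | cons d t =>
    simp only [rStep, checkStep, List.reverse_cons]
    have hlast : (t.reverse ++ [d]).getLast! = d := by
      rw [List.getLast!_eq_getLast?_getD]
      simp
    rw [if_pos (by simp), hlast, List.dropLast_concat]
    split <;> simp

theorem foldl_checkStep_reverse (cs : List Char) (rs : List Char) :
    cs.foldl checkStep rs.reverse = (cs.foldl rStep rs).reverse := by
  induction cs generalizing rs with
  | nil => rfl
  | cons c cs ih => simp only [List.foldl_cons, checkStep_reverse]; exact ih _

-- The stack never holds two equal adjacent characters.
theorem rStep_chain {rs : List Char} (h : rs.IsChain (· ≠ ·)) (c : Char) :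
    (rStep rs c).IsChain (· ≠ ·) := by
  cases rs with
  | nil => simp [rStep]
  | cons d t =>
    by_cases hc : c = d
    · simpa [rStep, hc] using (List.isChain_of_isChain_cons h)
    · simpa [rStep, hc] using h

-- Processing 'c, c' leaves an adjacent-distinct stack unchanged.
theorem rStep_pair {rs : List Char} (h : rs.IsChain (· ≠ ·)) (c : Char) :
    rStep (rStep rs c) c = rs := by
  cases rs with
  | nil => simp [rStep]
  | cons d t =>
    by_cases hc : c = d
    · subst hc
      cases t with
      | nil => simp [rStep]
      | cons e t2 =>
        have hde : c ≠ e := List.rel_of_isChain_cons_cons h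
        simp [rStep, hde]
    · simp [rStep, hc]

-- Deleting an adjacent equal pair anywhere does not change the final stack.
theorem foldl_rStep_delete (u : List Char) (c : Char) (v : List Char)
    {rs : List Char} (h : rs.IsChain (· ≠ ·)) :
    (u ++ c :: c :: v).foldl rStep rs = (u ++ v).foldl rStep rs := by
  induction u generalizing rs with
  | nil => simp [rStep_pair h]
  | cons a u ih => simpa using ih (rStep_chain h a)

-- On an adjacent-distinct word every character is pushed.
theorem foldl_rStep_nopair (l : List Char) (rs : List Char)
    (hl : l.IsChain (· ≠ ·))
    (hhead : ∀ c s, l.head? = some c → rs.head? = some s → c ≠ s) :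
    l.foldl rStep rs = l.reverse ++ rs := by
  induction l generalizing rs with
  | nil => simp
  | cons c cs ih =>
    have hstep : rStep rs c = c :: rs := by
      cases rs with
      | nil => simp [rStep]
      | cons s st => simp [rStep, hhead c s rfl rfl]
    simp only [List.foldl_cons, hstep]
    rw [ih (c :: rs) (List.isChain_of_isChain_cons hl)
      (fun d s hd hs => by
        cases cs with
        | nil => cases hd
        | cons e t =>
          cases hd; cases hs
          exact fun he => (List.rel_of_isChain_cons_cons hl) he.symm)]
    simp

theorem findDel_none {l : List Char} (h : findDel l = none) :
    l.IsChain (· ≠ ·) := by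
  induction l with
  | nil => exact .nil
  | cons a t ih =>
    cases t with
    | nil => exact .singleton _
    | cons b rest =>
      rw [findDel] at h
      split at h
      · cases h
      · simp only [Option.map_eq_none_iff] at h
        exact List.isChain_cons_cons.mpr ⟨by assumption, ih h⟩

theorem findDel_some {l l' : List Char} (h : findDel l = some l') :
    ∃ u c v, l = u ++ c :: c :: v ∧ l' = u ++ v := by
  induction l generalizing l' with
  | nil => simp [findDel] at h
  | cons a t ih =>
    cases t with
    | nil => simp [findDel] at h
    | cons b rest =>
      rw [findDel] at h
      split at h
      · rename_i hab
        have hr : rest = l' := Option.some.inj h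
        exact ⟨[], a, l', by simp [hab, hr], by simp⟩
      · simp only [Option.map_eq_some_iff] at h
        obtain ⟨m, hm, rfl⟩ := h
        obtain ⟨u, c, v, h1, h2⟩ := ih hm
        exact ⟨a :: u, c, v, by simp [h1], by simp [h2]⟩

-- The stack result is invariant under B's reduction loop.
theorem foldl_reduceLoop (l : List Char) :
    (reduceLoop l).foldl rStep [] = l.foldl rStep [] := by
  rw [reduceLoop]
  split
  · rename_i l' h
    obtain ⟨u, c, v, hl, hl'⟩ := findDel_some h
    subst hl'
    have hlt : (u ++ v).length < l.length := findDel_length h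
    rw [foldl_reduceLoop (u ++ v), hl]
    exact (foldl_rStep_delete u c v .nil).symm
  · rfl
termination_by l.length

theorem reduceLoop_nopair (l : List Char) : (reduceLoop l).IsChain (· ≠ ·) := by
  rw [reduceLoop]
  split
  · rename_i l' h
    have hlt : l'.length < l.length := findDel_length h
    exact reduceLoop_nopair l'
  · exact findDel_none (by assumption)
termination_by l.length

theorem stack_empty_iff (l : List Char) :
    l.foldl rStep [] = [] ↔ reduceLoop l = [] := by
  rw [← foldl_reduceLoop]
  rw [foldl_rStep_nopair (reduceLoop l) [] (reduceLoop_nopair l)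
    (fun _ _ _ h => by cases h)]
  simp

-- ===== VERDICT (by name: the statement is the Claim_ definition above) =====
theorem check_spec : Claim_equal_check := by
  intro s _
  unfold Spec_check check check_alt
  have h := foldl_checkStep_reverse s.toList []
  simp only [List.reverse_nil] at h
  rw [h]
  have hiff := stack_empty_iff s.toList
  by_cases he : s.toList.foldl rStep [] = []
  · rw [if_pos (by simp [he]), if_pos (hiff.mp he)]
  · rw [if_neg (by simpa using he), if_neg (fun hc => he (hiff.mpr hc))]
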